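-- pv_equiv track=rewrite | github.com/dev-hang/Programmers-Algorithm | level2/donut_and_bar_graph.py | donut_and_bar_graph
-- ===== SOURCE A (Python) =====
-- def donut_and_bar_graph(edges):
--     answer = [0, 0, 0, 0]
--     edge_cnt = {}
--
--     for a, b in edges:
--         if a not in edge_cnt:
--             edge_cnt[a] = [0, 0]
--         if b not in edge_cnt:
--             edge_cnt[b] = [0, 0]
--         edge_cnt[a][0] += 1
--         edge_cnt[b][1] += 1
--
--     for edge, cnt in edge_cnt.items():
--         out_cnt, in_cnt = cnt
--         if out_cnt >= 2 and in_cnt == 0: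
--             answer[0] = edge
--         elif out_cnt == 0 and in_cnt >= 1:
--             answer[2] += 1
--         elif out_cnt == 2 and in_cnt >= 2:
--             answer[3] += 1
--
--     answer[1] = (edge_cnt[answer[0]][0] - answer[2] - answer[3])
--
--     return answer
-- ===== SOURCE B (Python) =====
-- def donut_and_bar_graph(edges):
--     # No degree map at all: degrees are read off as multiset counts of the two
--     # projection lists, and the out==0 / in>=1 tests collapse to plain
--     # membership tests; nodes are collected in first-occurrence order.
--     firsts = [a for a, _ in edges]
--     seconds = [b for _, b in edges]
--     flat = [v for e in edges for v in e]
--     nodes = []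
--     for v in flat:
--         if v not in nodes:
--             nodes.append(v)
--     root = 0
--     for n in nodes:
--         if firsts.count(n) >= 2 and n not in seconds:
--             root = n
--     bars = sum(1 for n in nodes if n not in firsts)
--     eights = sum(1 for n in nodes if firsts.count(n) == 2 and seconds.count(n) >= 2)
--     return [root, firsts.count(root) - bars - eights, bars, eights]
-- ===== Notes on version B (the rewrite author's own statement) =====
-- stated objective: alternative
-- what changed: Drops A's per-node [out,in] counter dict and its single interleaved if/elif classification loop entirely: B reads degrees off the raw projection lists with list.count and plain membership tests (out==0&in>=1 becomes 'n not in firsts'), computing root, bars and eights in separate passes over the first-occurrence node list.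
import Mathlib
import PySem

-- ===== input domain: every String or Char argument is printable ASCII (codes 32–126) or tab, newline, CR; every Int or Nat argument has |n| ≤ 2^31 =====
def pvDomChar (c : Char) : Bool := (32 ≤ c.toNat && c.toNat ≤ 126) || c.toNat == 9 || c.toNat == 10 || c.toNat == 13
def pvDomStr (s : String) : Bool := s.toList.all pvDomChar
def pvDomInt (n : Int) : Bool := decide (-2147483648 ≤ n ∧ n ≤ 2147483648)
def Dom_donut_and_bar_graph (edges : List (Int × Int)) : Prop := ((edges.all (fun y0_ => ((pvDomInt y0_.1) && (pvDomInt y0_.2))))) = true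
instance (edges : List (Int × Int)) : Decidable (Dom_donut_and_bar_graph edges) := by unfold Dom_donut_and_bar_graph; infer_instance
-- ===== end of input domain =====

-- B drops A's per-node [out,in] counter dict and interleaved classification loop:
-- degrees are read off the projection lists by multiset counts and membership
-- tests, in separate passes (objective: alternative decomposition, not faster).

-- ===== PORT A =====
-- one edge step of A's first loop: conditional inserts of [0,0], then the two increments
def pvAStep (d : PySem.Dict Int (Int × Int)) (e : Int × Int) : PySem.Dict Int (Int × Int) :=
  let d := if d.contains e.1 then d else d.insert e.1 (0, 0)
  let d := if d.contains e.2 then d else d.insert e.2 (0, 0)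
  let d := d.modify e.1 (0, 0) (fun p => (p.1 + 1, p.2))
  d.modify e.2 (0, 0) (fun p => (p.1, p.2 + 1))

def donut_and_bar_graph (edges : List (Int × Int)) : List Int :=
  -- answer = [0,0,0,0]; the three mutated cells are carried as (a0, a2, a3)
  let edge_cnt := edges.foldl pvAStep (PySem.Dict.mk [])
  let acc := edge_cnt.items.foldl (fun (acc : Int × Int × Int) p =>
    if p.2.1 ≥ 2 ∧ p.2.2 = 0 then (p.1, acc.2.1, acc.2.2)
    else if p.2.1 = 0 ∧ p.2.2 ≥ 1 then (acc.1, acc.2.1 + 1, acc.2.2)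
    else if p.2.1 = 2 ∧ p.2.2 ≥ 2 then (acc.1, acc.2.1, acc.2.2 + 1)
    else acc) (0, 0, 0)
  -- edge_cnt[answer[0]] : KeyError when absent (excluded by Pre_); total form via getD
  let a1 := (edge_cnt.getD acc.1 (0, 0)).1 - acc.2.1 - acc.2.2
  [acc.1, a1, acc.2.1, acc.2.2]

-- ===== PORT B =====
def donut_and_bar_graph_alt (edges : List (Int × Int)) : List Int :=
  let firsts := edges.map (fun e => e.1)
  let seconds := edges.map (fun e => e.2)
  let flat := edges.flatMap (fun e => [e.1, e.2])
  -- 'for v in flat: if v not in nodes: nodes.append(v)' is exactly foldl Set.add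
  let nodes := flat.foldl PySem.Set.add ([] : List Int)
  let root := nodes.foldl (fun r n => if firsts.count n ≥ 2 ∧ n ∉ seconds then n else r) 0
  let bars : Int := (nodes.countP (fun n => !(firsts.contains n)) : Nat)
  let eights : Int := (nodes.countP (fun n => firsts.count n == 2 && decide (seconds.count n ≥ 2)) : Nat)
  [root, (firsts.count root : Int) - bars - eights, bars, eights]

-- ===== PRECONDITION & SPEC =====
-- Pre_ excludes exactly the inputs on which A raises KeyError on edge_cnt[answer[0]]:
-- no node with out-degree >= 2 and in-degree 0, and 0 is not an endpoint of any edge.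
def Pre_donut_and_bar_graph (edges : List (Int × Int)) : Prop :=
  (∃ p ∈ edges, 2 ≤ (edges.map Prod.fst).count p.1 ∧ (edges.map Prod.snd).count p.1 = 0)
  ∨ (∃ p ∈ edges, p.1 = 0 ∨ p.2 = 0)
instance (edges : List (Int × Int)) : Decidable (Pre_donut_and_bar_graph edges) := by
  unfold Pre_donut_and_bar_graph; infer_instance

def pvWitness_donut_and_bar_graph : (List (Int × Int)) := [(1, 2), (1, 3)]

def Spec_donut_and_bar_graph (edges : List (Int × Int)) (out : List Int) : Prop := out = donut_and_bar_graph_alt edges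
instance (edges : List (Int × Int)) (out : List Int) : Decidable (Spec_donut_and_bar_graph edges out) := by unfold Spec_donut_and_bar_graph; infer_instance

-- ===== CLAIM (what is proved, stated in full; the proofs are below) =====
def Claim_equal_donut_and_bar_graph : Prop := ∀ (edges : List (Int × Int)), Dom_donut_and_bar_graph edges → Pre_donut_and_bar_graph edges → Spec_donut_and_bar_graph edges (donut_and_bar_graph edges)

-- ===== LEMMAS AND PROOFS =====

-- a dict with nodup keys is its key list paired with the getD values
lemma pvItemsEqAux {κ ν : Type} [BEq κ] [LawfulBEq κ] (l : List (κ × ν)) (w : ν)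
    (h : (l.map Prod.fst).Nodup) :
    l = (l.map Prod.fst).map (fun k => (k, (PySem.Dict.mk l).getD k w)) := by
  induction l with
  | nil => rfl
  | cons p t ih =>
    simp only [List.map_cons, List.nodup_cons, List.mem_map] at h
    obtain ⟨hp, ht⟩ := h
    have hhead : (PySem.Dict.mk (p :: t)).getD p.1 w = p.2 := by
      simp [PySem.Dict.getD, PySem.Dict.get?, List.find?]
    have htail : ∀ k ∈ t.map Prod.fst,
        (PySem.Dict.mk (p :: t)).getD k w = (PySem.Dict.mk t).getD k w := by
      intro k hk
      have hne : ¬ (p.1 == k) = true := by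
        simp only [beq_iff_eq]
        rintro rfl
        rcases List.mem_map.mp hk with ⟨q, hq, hq1⟩
        exact hp ⟨q, hq, hq1⟩
      simp [PySem.Dict.getD, PySem.Dict.get?, List.find?, hne]
    have hmap : (t.map Prod.fst).map (fun k => (k, (PySem.Dict.mk (p :: t)).getD k w))
        = (t.map Prod.fst).map (fun k => (k, (PySem.Dict.mk t).getD k w)) :=
      List.map_congr_left (fun k hk => by rw [htail k hk])
    simp only [List.map_cons]
    rw [hhead, hmap, ← ih ht]

lemma pvItemsEq {κ ν : Type} [BEq κ] [LawfulBEq κ] (d : PySem.Dict κ ν) (w : ν)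
    (h : d.keys.Nodup) : d.items = d.keys.map (fun k => (k, d.getD k w)) := by
  obtain ⟨l⟩ := d
  exact pvItemsEqAux l w h

lemma pvKeysInsert {κ ν : Type} [BEq κ] [LawfulBEq κ] (d : PySem.Dict κ ν) (k : κ) (v : ν) :
    (d.insert k v).keys = if d.contains k then d.keys else d.keys ++ [k] := by
  unfold PySem.Dict.insert
  split_ifs with h
  · simp only [PySem.Dict.keys, List.map_map]
    refine List.map_congr_left ?_
    intro p _
    by_cases hp : (p.1 == k) = true
    · simp only [Function.comp_apply, hp, if_pos]
      exact (beq_iff_eq.mp hp).symm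
    · simp [Function.comp_apply, hp]
  · simp [PySem.Dict.keys]

lemma pvContainsKeys {κ ν : Type} [BEq κ] [LawfulBEq κ] [DecidableEq κ]
    (d : PySem.Dict κ ν) (k : κ) :
    d.contains k = PySem.Set.contains d.keys k := by
  rw [PySem.Dict.contains_eq_decide_mem_keys, PySem.Set.contains]
  by_cases h : k ∈ d.keys
  · simp [h]
  · simp [h]

lemma pvKeysAStep (d : PySem.Dict Int (Int × Int)) (e : Int × Int) :
    (pvAStep d e).keys = PySem.Set.add (PySem.Set.add d.keys e.1) e.2 := by
  unfold pvAStep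
  have h1 : (if d.contains e.1 then d else d.insert e.1 (0, 0)).keys
      = PySem.Set.add d.keys e.1 := by
    rw [PySem.Set.add, ← pvContainsKeys]
    split_ifs with h <;> simp [pvKeysInsert, h]
  set d1 := if d.contains e.1 then d else d.insert e.1 (0, 0) with hd1
  have h2 : (if d1.contains e.2 then d1 else d1.insert e.2 (0, 0)).keys
      = PySem.Set.add d1.keys e.2 := by
    rw [PySem.Set.add, ← pvContainsKeys]
    split_ifs with h <;> simp [pvKeysInsert, h]
  set d2 := if d1.contains e.2 then d1 else d1.insert e.2 (0, 0) with hd2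
  have hm1 : e.1 ∈ d2.keys := by
    rw [h2, h1]
    exact (PySem.Set.mem_add _ _ _).mpr (Or.inl ((PySem.Set.mem_add _ _ _).mpr (Or.inr rfl)))
  have hc1 : d2.contains e.1 = true := by
    rw [PySem.Dict.contains_eq_decide_mem_keys]; exact decide_eq_true hm1
  have h3 : (d2.modify e.1 (0, 0) fun p => (p.1 + 1, p.2)).keys = d2.keys := by
    rw [PySem.Dict.keys_modify, pvKeysInsert, if_pos hc1]
  set d3 := d2.modify e.1 (0, 0) fun p => (p.1 + 1, p.2) with hd3
  have hm2 : e.2 ∈ d3.keys := by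
    rw [h3, h2]
    exact (PySem.Set.mem_add _ _ _).mpr (Or.inr rfl)
  have hc2 : d3.contains e.2 = true := by
    rw [PySem.Dict.contains_eq_decide_mem_keys]; exact decide_eq_true hm2
  rw [PySem.Dict.keys_modify, pvKeysInsert, if_pos hc2, h3, h2, h1]

lemma pvGetDCondInsert (d : PySem.Dict Int (Int × Int)) (k n : Int) :
    (if d.contains k then d else d.insert k (0, 0)).getD n (0, 0) = d.getD n (0, 0) := by
  split_ifs with h
  · rfl
  · by_cases hn : n = k
    · subst hn
      rw [PySem.Dict.getD_insert_self]
      have : d.get? n = none := (PySem.Dict.get?_eq_none_iff_contains d n).mpr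
        (by simpa using h)
      simp [PySem.Dict.getD, this]
    · rw [PySem.Dict.getD_insert_of_ne _ _ _ hn]

lemma pvGetDAStep (d : PySem.Dict Int (Int × Int)) (e : Int × Int) (n : Int) :
    (pvAStep d e).getD n (0, 0)
      = ((d.getD n (0, 0)).1 + (if n = e.1 then 1 else 0),
         (d.getD n (0, 0)).2 + (if n = e.2 then 1 else 0)) := by
  simp only [pvAStep, PySem.Dict.getD_modify, pvGetDCondInsert]
  by_cases h2 : n = e.2 <;> by_cases h1 : n = e.1 <;> by_cases h3 : e.2 = e.1 <;>
    simp_all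

-- characterisation of A's first loop: keys = flattened endpoints dedup'd, values = counts
lemma pvAFoldChar (es : List (Int × Int)) :
    (es.foldl pvAStep (PySem.Dict.mk [])).keys
        = PySem.List.dedup (es.flatMap (fun e => [e.1, e.2]))
    ∧ ∀ n : Int, (es.foldl pvAStep (PySem.Dict.mk [])).getD n (0, 0)
        = ((List.count n (es.map Prod.fst) : Int), (List.count n (es.map Prod.snd) : Int)) := by
  induction es using List.reverseRecOn with
  | nil => exact ⟨rfl, fun n => rfl⟩
  | append_singleton t e ih =>
    obtain ⟨hk, hv⟩ := ih
    constructor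
    · rw [List.foldl_append, List.foldl_cons, List.foldl_nil, pvKeysAStep, hk,
        PySem.List.dedup_eq_ofList, PySem.List.dedup_eq_ofList,
        PySem.Set.ofList_eq_foldl, PySem.Set.ofList_eq_foldl]
      rw [List.flatMap_append, List.foldl_append]
      simp
    · intro n
      rw [List.foldl_append, List.foldl_cons, List.foldl_nil, pvGetDAStep, hv]
      simp only [List.map_append, List.count_append, List.map_cons, List.map_nil]
      by_cases h1 : n = e.1 <;> by_cases h2 : n = e.2 <;>
        simp_all [List.count_singleton, Prod.ext_iff] <;> omega

-- A's single interleaved classification loop splits into a root fold and two counts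
lemma pvLoopSplit (o i : Int → Int) (ns : List Int) (r x y : Int) :
    ns.foldl (fun (acc : Int × Int × Int) n =>
        if o n ≥ 2 ∧ i n = 0 then (n, acc.2.1, acc.2.2)
        else if o n = 0 ∧ i n ≥ 1 then (acc.1, acc.2.1 + 1, acc.2.2)
        else if o n = 2 ∧ i n ≥ 2 then (acc.1, acc.2.1, acc.2.2 + 1)
        else acc) (r, x, y)
    = (ns.foldl (fun r n => if o n ≥ 2 ∧ i n = 0 then n else r) r,
       x + (ns.countP (fun n => (o n == 0) && decide (i n ≥ 1)) : Int),
       y + (ns.countP (fun n => (o n == 2) && decide (i n ≥ 2)) : Int)) := by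
  induction ns generalizing r x y with
  | nil => simp
  | cons a t ih =>
    simp only [List.foldl_cons, List.countP_cons]
    by_cases c1 : o a ≥ 2 ∧ i a = 0
    · have hp2 : ((o a == 0) && decide (i a ≥ 1)) = false := by
        simp only [Bool.and_eq_false_iff, beq_eq_false_iff_ne, decide_eq_false_iff_not]
        omega
      have hp3 : ((o a == 2) && decide (i a ≥ 2)) = false := by
        simp only [Bool.and_eq_false_iff, beq_eq_false_iff_ne, decide_eq_false_iff_not]
        omega
      rw [if_pos c1, ih, if_pos c1, hp2, hp3]
      simp
    · by_cases c2 : o a = 0 ∧ i a ≥ 1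
      · have hp2 : ((o a == 0) && decide (i a ≥ 1)) = true := by
          simp only [Bool.and_eq_true, beq_iff_eq, decide_eq_true_eq]
          omega
        have hp3 : ((o a == 2) && decide (i a ≥ 2)) = false := by
          simp only [Bool.and_eq_false_iff, beq_eq_false_iff_ne, decide_eq_false_iff_not]
          omega
        rw [if_neg c1, if_pos c2, ih, if_neg c1, hp2, hp3]
        refine Prod.ext rfl (Prod.ext ?_ ?_) <;> (simp; try omega)
      · by_cases c3 : o a = 2 ∧ i a ≥ 2
        · have hp2 : ((o a == 0) && decide (i a ≥ 1)) = false := by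
            simp only [Bool.and_eq_false_iff, beq_eq_false_iff_ne, decide_eq_false_iff_not]
            omega
          have hp3 : ((o a == 2) && decide (i a ≥ 2)) = true := by
            simp only [Bool.and_eq_true, beq_iff_eq, decide_eq_true_eq]
            omega
          rw [if_neg c1, if_neg c2, if_pos c3, ih, if_neg c1, hp2, hp3]
          refine Prod.ext rfl (Prod.ext ?_ ?_) <;> (simp; try omega)
        · have hp2 : ((o a == 0) && decide (i a ≥ 1)) = false := by
            simp only [Bool.and_eq_false_iff, beq_eq_false_iff_ne, decide_eq_false_iff_not]
            omega
          have hp3 : ((o a == 2) && decide (i a ≥ 2)) = false := by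
            simp only [Bool.and_eq_false_iff, beq_eq_false_iff_ne, decide_eq_false_iff_not]
            omega
          rw [if_neg c1, if_neg c2, if_neg c3, ih, if_neg c1, hp2, hp3]
          simp

-- membership in the flattened endpoint list
lemma pvMemFlat (es : List (Int × Int)) (n : Int) :
    n ∈ es.flatMap (fun e => [e.1, e.2]) ↔ n ∈ es.map Prod.fst ∨ n ∈ es.map Prod.snd := by
  simp only [List.mem_flatMap, List.mem_map, List.mem_cons, List.not_mem_nil, or_false]
  constructor
  · rintro ⟨e, he, h | h⟩
    · exact Or.inl ⟨e, he, h.symm⟩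
    · exact Or.inr ⟨e, he, h.symm⟩
  · rintro (⟨e, he, h⟩ | ⟨e, he, h⟩) <;> exact ⟨e, he, by simp [h]⟩

-- the three B-side passes, rewritten to A's count-based predicates
lemma pvRootEq (F S N : List Int) :
    N.foldl (fun r n => if F.count n ≥ 2 ∧ n ∉ S then n else r) 0
    = N.foldl (fun r n =>
        if ((List.count n F : Int)) ≥ 2 ∧ ((List.count n S : Int)) = 0 then n else r) 0 := by
  refine PySem.List.foldl_congr_mem _ _ _ _ ?_
  intro r n _
  have h : ((List.count n S : Int) = 0) ↔ n ∉ S := by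
    rw [Int.natCast_eq_zero, List.count_eq_zero]
  have h2 : ((List.count n F : Int) ≥ 2) ↔ F.count n ≥ 2 := by omega
  by_cases hc : F.count n ≥ 2 ∧ n ∉ S
  · rw [if_pos hc, if_pos ⟨h2.mpr hc.1, h.mpr hc.2⟩]
  · rw [if_neg hc, if_neg (fun hx => hc ⟨h2.mp hx.1, h.mp hx.2⟩)]

lemma pvBarsEq (F S N : List Int) (hN : ∀ n ∈ N, n ∈ F ∨ n ∈ S) :
    (N.countP fun n => !(F.contains n))
    = N.countP (fun n => ((List.count n F : Int) == 0) && decide ((List.count n S : Int) ≥ 1)) := by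
  refine List.countP_congr ?_
  intro n hn
  by_cases hf : n ∈ F
  · have h1 : List.count n F ≠ 0 := by rw [← List.count_pos_iff] at hf; omega
    simp [hf, h1]
  · have h2 : n ∈ S := (hN n hn).resolve_left hf
    have h3 : 0 < List.count n S := List.count_pos_iff.mpr h2
    have h0 : List.count n F = 0 := List.count_eq_zero.mpr hf
    simp [hf, h0]
    omega

lemma pvEightsEq (F S N : List Int) :
    (N.countP fun n => (F.count n == 2) && decide (S.count n ≥ 2))
    = N.countP (fun n => ((List.count n F : Int) == 2) && decide ((List.count n S : Int) ≥ 2)) := by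
  refine List.countP_congr ?_
  intro n _
  by_cases h1 : List.count n F = 2
  · by_cases h2 : List.count n S ≥ 2
    · have h2' : (List.count n S : Int) ≥ 2 := by omega
      simp [h1, h2, h2']
    · have h2' : ¬ ((List.count n S : Int) ≥ 2) := by omega
      simp [h2, h2']
  · have h1' : ¬ ((List.count n F : Int) = 2) := by omega
    simp [h1, h1']

-- ===== VERDICT (by name: the statement is the Claim_ definition above) =====
theorem donut_and_bar_graph_spec : Claim_equal_donut_and_bar_graph := by
  intro edges _hDom _hPre
  unfold Spec_donut_and_bar_graph
  obtain ⟨hk, hv⟩ := pvAFoldChar edges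
  simp only [donut_and_bar_graph, donut_and_bar_graph_alt]
  have hnodup : (edges.foldl pvAStep (PySem.Dict.mk [])).keys.Nodup := by
    rw [hk]; exact PySem.List.nodup_dedup _
  rw [pvItemsEq _ (0, 0) hnodup]
  simp only [List.foldl_map, hv, hk]
  rw [pvLoopSplit (fun n => (List.count n (edges.map Prod.fst) : Int))
      (fun n => (List.count n (edges.map Prod.snd) : Int))]
  have hnodes : (edges.flatMap (fun e => [e.1, e.2])).foldl PySem.Set.add ([] : List Int)
      = PySem.List.dedup (edges.flatMap (fun e => [e.1, e.2])) := by
    rw [PySem.List.dedup_eq_ofList, PySem.Set.ofList_eq_foldl]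
  rw [hnodes]
  have hmem : ∀ n ∈ PySem.List.dedup (edges.flatMap (fun e => [e.1, e.2])),
      n ∈ edges.map Prod.fst ∨ n ∈ edges.map Prod.snd := by
    intro n hn
    exact (pvMemFlat edges n).mp ((PySem.List.mem_dedup _ _).mp hn)
  rw [pvRootEq, pvBarsEq _ _ _ hmem, pvEightsEq]
  simp
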